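-- pv_equiv track=rewrite | github.com/INF1007-2020A/2021h-ch5-exercices-MissChungus | exercice.py | verify_ages
-- ===== SOURCE A (Python) =====
-- from typing import List
--
-- def verify_ages(groups: List[List[int]]) -> List[bool]:
--     liste_finale = [True for groupe in groups]
--     for i in range(len(groups)):
--         if len(groups[i]) > 10 or len(groups[i]) <= 3:
--             liste_finale[i] = False
--             continue
--         for i2 in range(len(groups[i])):
--             if groups[i][i2] == 25:
--                 liste_finale[i] = True
--                 break
--             elif groups[i][i2] < 18:
--                 liste_finale[i] = False
--             elif groups[i][i2] > 70:
--                 for i3 in range(len(groups[i])):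
--                     if groups[i][i3] == 50:
--                         liste_finale[i] = False
--     return liste_finale
-- ===== SOURCE B (Python) =====
-- from typing import List
--
--
-- def _ok(g: List[int]) -> bool:
--     if not (3 < len(g) <= 10):
--         return False
--     if 25 in g:
--         return True
--     return not (any(e < 18 for e in g) or (50 in g and any(e > 70 for e in g)))
--
--
-- def verify_ages(groups: List[List[int]]) -> List[bool]:
--     return [_ok(g) for g in groups]
-- ===== Notes on version B (the rewrite author's own statement) =====
-- stated objective: simpler
-- what changed: Replaced A's preinitialized result list mutated by an indexed stateful scan with break and a nested inner 50-scan by a per-group early-return predicate built from membership and any() tests, mapped over the groups.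
import Mathlib
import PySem

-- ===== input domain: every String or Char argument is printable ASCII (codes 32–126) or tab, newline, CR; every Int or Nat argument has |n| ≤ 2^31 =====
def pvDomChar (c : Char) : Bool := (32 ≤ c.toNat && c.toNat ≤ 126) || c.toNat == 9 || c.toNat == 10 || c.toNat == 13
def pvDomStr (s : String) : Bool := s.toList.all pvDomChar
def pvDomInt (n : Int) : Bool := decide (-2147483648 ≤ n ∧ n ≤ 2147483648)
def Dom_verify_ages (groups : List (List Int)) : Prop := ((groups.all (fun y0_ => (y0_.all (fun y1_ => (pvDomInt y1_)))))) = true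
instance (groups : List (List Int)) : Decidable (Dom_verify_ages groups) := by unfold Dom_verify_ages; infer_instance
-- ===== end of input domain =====

-- B replaces A's stateful indexed scan-with-break (and its nested 50-scan) by a
-- per-group early-return predicate of membership/any tests; objective: simpler.

-- ===== PORT A =====
-- inner `for i3` loop: scans the whole group, writing False whenever it sees 50
def vaScan50 (g : List Int) (cur : Bool) : Bool :=
  g.foldl (fun c x => if x == 50 then false else c) cur

-- inner `for i2` loop over the group's elements, carrying the flag for this group;
-- `rest` is the unscanned suffix, `g` the whole group (the i3 loop rescans it all)
def vaInner (g : List Int) (rest : List Int) (cur : Bool) : Bool :=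
  match rest with
  | [] => cur
  | x :: rs =>
    if x == 25 then true
    else if x < 18 then vaInner g rs false
    else if x > 70 then vaInner g rs (vaScan50 g cur)
    else vaInner g rs cur

-- outer loop: liste_finale[i] is written only by iteration i, so the indexed
-- loop over the preinitialized list is rendered as a map of the per-index body
def verify_ages (groups : List (List Int)) : List Bool :=
  groups.map (fun g =>
    if g.length > 10 || decide (g.length ≤ 3) then false
    else vaInner g g true)

-- ===== PORT B =====
def vaOk (g : List Int) : Bool :=
  if !(decide (3 < g.length) && decide (g.length ≤ 10)) then false
  else if g.contains 25 then true
  else !(g.any (fun e => decide (e < 18)) || (g.contains 50 && g.any (fun e => decide (e > 70))))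

def verify_ages_alt (groups : List (List Int)) : List Bool :=
  groups.map vaOk

-- ===== PRECONDITION & SPEC =====
def Spec_verify_ages (groups : List (List Int)) (out : List Bool) : Prop := out = verify_ages_alt groups
instance (groups : List (List Int)) (out : List Bool) : Decidable (Spec_verify_ages groups out) := by unfold Spec_verify_ages; infer_instance

-- ===== CLAIM (what is proved, stated in full; the proofs are below) =====
def Claim_equal_verify_ages : Prop := ∀ (groups : List (List Int)), Dom_verify_ages groups → Spec_verify_ages groups (verify_ages groups)

-- ===== LEMMAS AND PROOFS =====
theorem vaScan50_eq (g : List Int) (cur : Bool) :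
    vaScan50 g cur = if g.contains 50 then false else cur := by
  induction g generalizing cur with
  | nil => simp [vaScan50]
  | cons x xs ih =>
    rw [show vaScan50 (x :: xs) cur = vaScan50 xs (if x == 50 then false else cur) from rfl, ih]
    by_cases hx : x = 50
    · simp_all
    · by_cases h50 : xs.contains 50 = true <;> simp_all [Ne.symm hx]

theorem vaInner_eq (g : List Int) (rest : List Int) (cur : Bool) :
    vaInner g rest cur =
      if rest.contains 25 then true
      else if rest.any (fun e => decide (e < 18)) then false
      else if rest.any (fun e => decide (e > 70)) && g.contains 50 then false
      else cur := by
  induction rest generalizing cur with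
  | nil => simp [vaInner]
  | cons x rs ih =>
    rw [show (x :: rs).contains 25 = ((25 : Int) == x || rs.contains 25) from List.contains_cons]
    rw [List.any_cons, List.any_cons]
    unfold vaInner
    by_cases h25 : x = 25
    · simp [h25]
    · rw [if_neg (by simpa using h25)]
      by_cases h18 : x < 18
      · have h70 : ¬ x > 70 := by omega
        rw [if_pos (by simpa using h18), ih]
        simp [h18, Ne.symm h25]
      · rw [if_neg (by simpa using h18)]
        by_cases h70 : x > 70
        · rw [if_pos (by simpa using h70), ih, vaScan50_eq]
          cases hc25 : rs.contains 25 <;>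
            cases hc18 : rs.any (fun e => decide (e < 18)) <;>
              cases hc50 : g.contains 50 <;>
                simp_all [Ne.symm h25]
        · rw [if_neg (by simpa using h70), ih]
          simp [h18, h70, Ne.symm h25]

theorem vaGroup_eq (g : List Int) :
    (if g.length > 10 || decide (g.length ≤ 3) then false else vaInner g g true) = vaOk g := by
  unfold vaOk
  by_cases hlen : g.length > 10 ∨ g.length ≤ 3
  · rw [if_pos (by simpa using hlen), if_pos (by simp; omega)]
  · rw [if_neg (by simpa using hlen), if_neg (by simp; omega), vaInner_eq]
    cases h25 : g.contains 25 <;>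
      cases h18 : g.any (fun e => decide (e < 18)) <;>
        cases h70 : g.any (fun e => decide (e > 70)) <;>
          cases h50 : g.contains 50 <;> simp_all

-- ===== VERDICT (by name: the statement is the Claim_ definition above) =====
theorem verify_ages_spec : Claim_equal_verify_ages := by
  intro groups _
  unfold Spec_verify_ages verify_ages verify_ages_alt
  exact List.map_congr_left (fun g _ => vaGroup_eq g)
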